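-- pv_equiv track=rewrite | github.com/TaranjyotS/InterviewPrep | coding_questions/technical_questions.py | findMaxTeamSize
-- ===== SOURCE A (Python) =====
-- def findMaxTeamSize(skills):
--     # Step 1: Sort the array
--     for i in range(len(skills)):
--         for j in range(i + 1, len(skills)):
--             if skills[i] > skills[j]:
--                 skills[i], skills[j] = skills[j], skills[i]
--
--     # Step 2: Frequency dictionary
--     freq = {}
--     for skill in skills:
--         if skill not in freq:
--             freq[skill] = 0
--         freq[skill] += 1
--
--     # Step 3: Calculate max team size
--     max_team_size = 0
--     for skill in freq:
--         current_team_size = freq[skill]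
--         if skill + 1 in freq:
--             current_team_size += freq[skill + 1]
--         max_team_size = max(max_team_size, current_team_size)
--
--     return max_team_size
-- ===== SOURCE B (Python) =====
-- def findMaxTeamSize(skills):
--     # sort in place (preserves A's observable in-place ascending mutation)
--     skills.sort()
--     best = 0
--     lo = 0
--     for hi in range(len(skills)):
--         # shrink the window until it only spans values skills[lo] and skills[lo]+1
--         while skills[hi] != skills[lo] and skills[hi] != skills[lo] + 1:
--             lo += 1
--         if hi - lo + 1 > best:
--             best = hi - lo + 1
--     return best
-- ===== Notes on version B (the rewrite author's own statement) =====
-- stated objective: faster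
-- what changed: Replaces A's O(n^2) exchange sort plus frequency-dictionary scan with list.sort() followed by a two-pointer sliding window over the sorted list that tracks only two indices and a best length (no frequency counts at all).
import Mathlib
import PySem

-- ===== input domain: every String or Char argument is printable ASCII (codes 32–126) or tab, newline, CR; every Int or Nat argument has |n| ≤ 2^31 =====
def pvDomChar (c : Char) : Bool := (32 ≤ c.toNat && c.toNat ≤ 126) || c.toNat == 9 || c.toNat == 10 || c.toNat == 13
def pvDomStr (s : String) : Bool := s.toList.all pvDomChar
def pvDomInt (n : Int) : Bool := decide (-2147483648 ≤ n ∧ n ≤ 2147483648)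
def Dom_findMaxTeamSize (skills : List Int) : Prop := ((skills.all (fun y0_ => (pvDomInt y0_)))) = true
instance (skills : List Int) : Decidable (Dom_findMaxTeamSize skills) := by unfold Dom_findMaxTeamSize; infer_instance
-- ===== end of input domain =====

-- B replaces A's hand-written O(n^2) swap sort + frequency dictionary by list.sort()
-- followed by a two-pointer sliding window over the sorted list (no counts kept).
-- Both A and B sort the argument in place in Python; the equivalence proved here is
-- about the return value.

-- ===== PORT A =====
-- step 1 swap body: indices i, j are always in range here, so pyGetD/pySetD are exact
def pvSwapStep (l : List Int) (i j : Int) : List Int :=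
  if PySem.List.pyGetD l i 0 > PySem.List.pyGetD l j 0 then
    PySem.List.pySetD (PySem.List.pySetD l i (PySem.List.pyGetD l j 0)) j (PySem.List.pyGetD l i 0)
  else l

def pvSortA (skills : List Int) : List Int :=
  let n : Int := skills.length
  (PySem.List.pyRange 0 n 1).foldl (fun l i =>
    (PySem.List.pyRange (i + 1) n 1).foldl (fun l j => pvSwapStep l i j) l) skills

-- step 2 body: after the guard the key is present, so getD is exact for freq[skill] += 1
def pvFreqStep (d : PySem.Dict Int Int) (x : Int) : PySem.Dict Int Int :=
  let d' := if d.contains x then d else d.insert x 0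
  d'.insert x (d'.getD x 0 + 1)

def findMaxTeamSize (skills : List Int) : Int :=
  let s := pvSortA skills
  let freq := s.foldl pvFreqStep PySem.Dict.empty
  freq.keys.foldl (fun m k =>
    let c := freq.getD k 0
    let c := if freq.contains (k + 1) then c + freq.getD (k + 1) 0 else c
    max m c) 0

-- ===== PORT B =====
-- the inner 'while' loop of B, with an explicit fuel that bounds its iteration count
-- (hi - lo iterations suffice: at lo = hi the condition is false); indices stay in range,
-- so pyGetD is exact
def pvAdvance (s : List Int) (hi lo : Int) : Nat → Int
  | 0 => lo
  | Nat.succ f =>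
      if PySem.List.pyGetD s hi 0 ≠ PySem.List.pyGetD s lo 0 ∧
         PySem.List.pyGetD s hi 0 ≠ PySem.List.pyGetD s lo 0 + 1 then
        pvAdvance s hi (lo + 1) f
      else lo

def findMaxTeamSize_alt (skills : List Int) : Int :=
  let s := PySem.List.sorted skills (fun x => x) false
  let st := (PySem.List.pyRange 0 (PySem.List.len s) 1).foldl
    (fun (st : Int × Int) hi =>
      let lo := pvAdvance s hi st.2 (hi - st.2).toNat
      let best := if hi - lo + 1 > st.1 then hi - lo + 1 else st.1
      (best, lo)) (0, 0)
  st.1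

-- ===== PRECONDITION & SPEC =====
def Spec_findMaxTeamSize (skills : List Int) (out : Int) : Prop := out = findMaxTeamSize_alt skills
instance (skills : List Int) (out : Int) : Decidable (Spec_findMaxTeamSize skills out) := by unfold Spec_findMaxTeamSize; infer_instance

-- ===== CLAIM (what is proved, stated in full; the proofs are below) =====
def Claim_equal_findMaxTeamSize : Prop := ∀ (skills : List Int), Dom_findMaxTeamSize skills → Spec_findMaxTeamSize skills (findMaxTeamSize skills)

-- ===== LEMMAS AND PROOFS =====

-- `pvF t h` = the left end of B's window at right end h: the number of leading
-- elements of t that are < t[h] - 1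
def pvF (t : List Int) (h : Nat) : Nat :=
  (t.takeWhile (fun x => decide (x < t.getD h 0 - 1))).length

theorem pv_foldl_pres {α β : Type} (p : β → Prop) (f : β → α → β) :
    ∀ (l : List α) (init : β), (∀ b a, a ∈ l → p b → p (f b a)) → p init → p (l.foldl f init) := by
  intro l
  induction l with
  | nil => intro init h h0; exact h0
  | cons a l ih =>
    intro init h h0
    exact ih (f init a) (fun b x hx hb => h b x (List.mem_cons_of_mem _ hx) hb)
      (h init a List.mem_cons_self h0)

theorem pv_count_set_add (l : List Int) (i : Nat) (h : i < l.length) (b c : Int) :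
    (l.set i b).count c + (if l[i] = c then 1 else 0) = l.count c + (if b = c then 1 else 0) := by
  have h1 := (List.set_perm_cons_eraseIdx h b).count_eq c
  have h2 := (List.getElem_cons_eraseIdx_perm h).count_eq c
  simp [List.count_cons] at h1 h2
  by_cases hb : b = c <;> by_cases hl : l[i] = c <;> simp [hb, hl] at h1 h2 ⊢ <;> omega

theorem pv_swapStep_perm (l : List Int) (i j : Int) (hi0 : 0 ≤ i) (hi : i < (l.length : Int))
    (hj0 : 0 ≤ j) (hj : j < (l.length : Int)) : (pvSwapStep l i j).Perm l := by
  have hiN : i.toNat < l.length := by omega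
  have hjN : j.toNat < l.length := by omega
  unfold pvSwapStep
  split
  · rw [PySem.List.pyGetD_eq_getElem l 0 hi0 hi, PySem.List.pyGetD_eq_getElem l 0 hj0 hj,
      PySem.List.pySetD_of_nonneg (i := i) _ _ hi0, PySem.List.pySetD_of_nonneg (i := j) _ _ hj0]
    rw [List.perm_iff_count]
    intro c
    have hjN' : j.toNat < (l.set i.toNat l[j.toNat]).length := by simpa using hjN
    have e1 := pv_count_set_add (l.set i.toNat l[j.toNat]) j.toNat hjN' l[i.toNat] c
    have e2 := pv_count_set_add l i.toNat hiN l[j.toNat] c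
    have hidx : (l.set i.toNat l[j.toNat])[j.toNat] = l[j.toNat] := by
      by_cases hij : i.toNat = j.toNat
      · simp [hij]
      · simp [hij]
    rw [hidx] at e1
    omega
  · exact List.Perm.refl l

theorem pv_sortA_perm (skills : List Int) : (pvSortA skills).Perm skills := by
  unfold pvSortA
  dsimp only
  refine pv_foldl_pres (fun l : List Int => l.Perm skills) _ _ _ ?_ (List.Perm.refl skills)
  intro l i hi hl
  refine pv_foldl_pres (fun l : List Int => l.Perm skills) _ _ _ ?_ hl
  intro l' j hj hl'
  have hlen : l'.length = skills.length := hl'.length_eq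
  rw [PySem.List.mem_pyRange_one] at hi hj
  exact (pv_swapStep_perm l' i j (by omega) (by rw [hlen]; omega)
    (by omega) (by rw [hlen]; omega)).trans hl'

theorem pv_freqStep_eq : pvFreqStep = fun d x => d.insert x (d.getD x 0 + 1) := by
  funext d x
  unfold pvFreqStep
  dsimp only
  by_cases h : d.contains x
  · simp [h]
  · rw [if_neg (by simp [h])]
    rw [PySem.Dict.getD_insert_self]
    rw [PySem.Dict.getD_of_not_contains d 0 (by simpa using h)]
    apply PySem.Dict.ext
    rw [PySem.Dict.items_insert_of_contains _ _ (PySem.Dict.contains_insert_self d x 0)]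
    rw [PySem.Dict.items_insert_of_not_contains _ _ (by simpa using h),
        PySem.Dict.items_insert_of_not_contains _ _ (by simpa using h)]
    rw [List.map_append]
    have : ∀ p ∈ d.items, p.1 ≠ x := by
      intro p hp hpx
      have hx : x ∈ d.keys := by
        simp only [PySem.Dict.keys]
        exact hpx ▸ List.mem_map_of_mem hp
      rw [← PySem.Dict.contains_iff_mem_keys] at hx
      exact h hx
    have : List.map (fun p => if (p.1 == x) = true then (x, (0 : Int) + 1) else p) d.items = d.items := by
      rw [List.map_congr_left (g := id) (fun p hp => by simp [this p hp]), List.map_id]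
    simp only [this]
    simp

theorem pv_tw_le_len (p : Int → Bool) (t : List Int) : (t.takeWhile p).length ≤ t.length :=
  (List.takeWhile_prefix p).sublist.length_le

theorem pv_tw_get (p : Int → Bool) (t : List Int) (i : Nat) (hi : i < (t.takeWhile p).length) :
    p (t[i]'(lt_of_lt_of_le hi (pv_tw_le_len p t))) := by
  have h1 : (t.takeWhile p)[i] = t[i]'(lt_of_lt_of_le hi (pv_tw_le_len p t)) :=
    (List.takeWhile_prefix p).getElem hi
  exact h1 ▸ List.mem_takeWhile_imp (List.getElem_mem hi)

theorem pv_tw_fail (p : Int → Bool) : ∀ (t : List Int) (k : Nat), k = (t.takeWhile p).length →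
    ∀ (hk : k < t.length), p t[k] = false := by
  intro t
  induction t with
  | nil => intro k hk h; simp at h
  | cons x xs ih =>
    intro k hk h
    by_cases hp : p x
    · have e : (x :: xs).takeWhile p = x :: xs.takeWhile p := by simp [hp]
      rw [e] at hk
      simp only [List.length_cons] at hk
      subst hk
      simpa using ih _ rfl (by simpa using h)
    · have e : (x :: xs).takeWhile p = [] := by simp [hp]
      rw [e] at hk
      simp only [List.length_nil] at hk
      subst hk
      simpa using hp

theorem pv_tw_mono (p q : Int → Bool) (himp : ∀ x, p x = true → q x = true) :
    ∀ t : List Int, (t.takeWhile p).length ≤ (t.takeWhile q).length := by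
  intro t
  induction t with
  | nil => simp
  | cons x xs ih =>
    by_cases hp : p x
    · have hq := himp x hp
      simp [hp, hq]
      omega
    · simp [List.takeWhile_cons, hp]

theorem pv_sorted_le (t : List Int) (hs : t.Pairwise (· ≤ ·)) (i j : Nat) (hj : j < t.length)
    (hij : i ≤ j) : t[i]'(lt_of_le_of_lt hij hj) ≤ t[j] := by
  rcases eq_or_lt_of_le hij with h | h
  · subst h; rfl
  · exact (List.pairwise_iff_getElem.mp hs) i j _ hj h

-- pvF facts, for h < t.length
theorem pvF_getD (t : List Int) (h : Nat) (hh : h < t.length) : t.getD h 0 = t[h] :=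
  List.getD_eq_getElem t 0 hh

theorem pvF_lt_val (t : List Int) (h : Nat) (hh : h < t.length) (l : Nat) (hl : l < pvF t h) :
    t[l]'(lt_of_lt_of_le hl ((pv_tw_le_len _ t).trans_eq rfl)) < t[h] - 1 := by
  have h2 := pv_tw_get (fun x => decide (x < t.getD h 0 - 1)) t l hl
  rw [decide_eq_true_iff] at h2
  exact lt_of_lt_of_eq h2 (by rw [pvF_getD t h hh])

theorem pvF_le (t : List Int) (hs : t.Pairwise (· ≤ ·)) (h : Nat) (hh : h < t.length) :
    pvF t h ≤ h := by
  by_contra hc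
  push_neg at hc
  have := pvF_lt_val t h hh h hc
  omega

theorem pvF_ge_val (t : List Int) (h : Nat) (hh : h < t.length) (hlt : pvF t h < t.length) :
    t[h] - 1 ≤ t[pvF t h] := by
  have := pv_tw_fail (fun x => decide (x < t.getD h 0 - 1)) t (pvF t h) rfl hlt
  rw [pvF_getD t h hh] at this
  simpa using this

theorem pvF_mono (t : List Int) (hs : t.Pairwise (· ≤ ·)) (h h' : Nat) (hhh : h ≤ h')
    (hh' : h' < t.length) : pvF t h ≤ pvF t h' := by
  apply pv_tw_mono
  intro x hx
  have hle : t[h]'(lt_of_le_of_lt hhh hh') ≤ t[h'] := pv_sorted_le t hs h h' hh' hhh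
  rw [pvF_getD t h (lt_of_le_of_lt hhh hh'), decide_eq_true_iff] at hx
  rw [pvF_getD t h' hh', decide_eq_true_iff]
  omega

theorem pv_advance_eq (t : List Int) (hs : t.Pairwise (· ≤ ·)) (h : Nat) (hh : h < t.length) :
    ∀ (fuel lo : Nat), lo ≤ pvF t h → h ≤ lo + fuel →
    pvAdvance t (h : Int) (lo : Int) fuel = (pvF t h : Int) := by
  intro fuel
  induction fuel with
  | zero =>
    intro lo hlo hfuel
    have := pvF_le t hs h hh
    have : lo = pvF t h := by omega
    simpa [pvAdvance] using congrArg (Nat.cast : Nat → Int) this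
  | succ f ih =>
    intro lo hlo hfuel
    have hFle := pvF_le t hs h hh
    have hloLt : lo < t.length := by omega
    rw [pvAdvance]
    rw [PySem.List.pyGetD_natCast, PySem.List.pyGetD_natCast,
        List.getD_eq_getElem t 0 hh, List.getD_eq_getElem t 0 hloLt]
    rcases eq_or_lt_of_le hlo with heq | hlt
    · -- lo = pvF t h : the loop condition is false
      subst heq
      have h1 : t[h] - 1 ≤ t[pvF t h]'(by omega) := pvF_ge_val t h hh (by omega)
      have h2 : t[pvF t h]'(by omega) ≤ t[h] := pv_sorted_le t hs (pvF t h) h hh (by omega)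
      rw [if_neg (by omega)]
    · -- lo < pvF t h : the loop condition is true, recurse
      have h1 : t[lo] < t[h] - 1 := pvF_lt_val t h hh lo hlt
      rw [if_pos (by constructor <;> omega)]
      have : ((lo : Int) + 1) = ((lo + 1 : Nat) : Int) := by push_cast; ring
      rw [this]
      exact ih (lo + 1) (by omega) (by omega)

theorem pv_foldl_max_le {α : Type} (f : α → Int) : ∀ (l : List α) (init c : Int), init ≤ c →
    (∀ x ∈ l, f x ≤ c) → l.foldl (fun b x => max b (f x)) init ≤ c := by
  intro l
  induction l with
  | nil => intro init c h0 _; simpa using h0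
  | cons x xs ih =>
    intro init c h0 h
    exact ih _ c (max_le h0 (h x List.mem_cons_self)) (fun y hy => h y (List.mem_cons_of_mem _ hy))

theorem pv_len_le_count2 (v : Int) : ∀ l : List Int, (∀ x ∈ l, x = v ∨ x = v + 1) →
    (l.length : Int) ≤ l.count v + l.count (v + 1) := by
  intro l
  induction l with
  | nil => simp
  | cons x xs ih =>
    intro h
    have hx := h x List.mem_cons_self
    have := ih (fun y hy => h y (List.mem_cons_of_mem _ hy))
    rcases hx with hx | hx <;> subst hx <;> simp [List.count_cons] <;> push_cast <;> omega

theorem pv_count2_le_len (a b : Int) (hab : a ≠ b) : ∀ l : List Int,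
    l.count a + l.count b ≤ l.length := by
  intro l
  induction l with
  | nil => simp
  | cons x xs ih =>
    by_cases ha : x = a
    · subst ha; simp [List.count_cons, hab, Ne.symm hab]
      omega
    · by_cases hb : x = b
      · subst hb; simp [List.count_cons, ha]
        omega
      · simp [List.count_cons, ha, hb]
        omega

theorem pv_if_max (b x : Int) : (if x > b then x else b) = max b x := by
  split_ifs with h <;> omega

-- invariant of B's fold: after m steps the state is (running max of window sizes, last lo)
theorem pv_fold_inv (t : List Int) (hs : t.Pairwise (· ≤ ·)) : ∀ m : Nat, m ≤ t.length →
    (List.map (fun k : Nat => (k : Int)) (List.range m)).foldl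
      (fun (st : Int × Int) hi =>
        (if hi - pvAdvance t hi st.2 (hi - st.2).toNat + 1 > st.1 then
           hi - pvAdvance t hi st.2 (hi - st.2).toNat + 1 else st.1,
         pvAdvance t hi st.2 (hi - st.2).toNat)) (0, 0)
    = ((List.range m).foldl (fun b (h : Nat) => max b ((h : Int) - (pvF t h : Int) + 1)) 0,
       if m = 0 then 0 else ((pvF t (m - 1) : Nat) : Int)) := by
  intro m
  induction m with
  | zero => intro _; simp
  | succ m ih =>
    intro hm
    have hmlt : m < t.length := by omega
    simp only [List.range_succ, List.map_append, List.foldl_append, List.map_cons, List.map_nil,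
      List.foldl_cons, List.foldl_nil]
    rw [ih (by omega)]
    have hloN : (if m = 0 then 0 else pvF t (m - 1)) ≤ pvF t m := by
      by_cases h0 : m = 0
      · simp [h0]
      · rw [if_neg h0]
        exact pvF_mono t hs (m - 1) m (by omega) hmlt
    have hcast : (if m = 0 then (0 : Int) else ((pvF t (m - 1) : Nat) : Int))
        = ((if m = 0 then 0 else pvF t (m - 1) : Nat) : Int) := by
      by_cases h0 : m = 0 <;> simp [h0]
    have hlole : (if m = 0 then 0 else pvF t (m - 1)) ≤ m := by
      have := pvF_le t hs m hmlt
      omega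
    have hfuel : ((m : Int) - ((if m = 0 then 0 else pvF t (m - 1) : Nat) : Int)).toNat
        = m - (if m = 0 then 0 else pvF t (m - 1)) := by omega
    have hadv := pv_advance_eq t hs m hmlt
      (m - (if m = 0 then 0 else pvF t (m - 1)))
      (if m = 0 then 0 else pvF t (m - 1)) hloN (by omega)
    simp only [hcast, hfuel, hadv, pv_if_max]
    simp

-- B computes the running max of the window sizes over the sorted list
theorem pv_alt_eq (skills : List Int) :
    findMaxTeamSize_alt skills =
      (List.range (PySem.List.sorted skills (fun x => x) false).length).foldl
        (fun b (h : Nat) => max b ((h : Int) - (pvF (PySem.List.sorted skills (fun x => x) false) h : Int) + 1)) 0 := by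
  unfold findMaxTeamSize_alt
  dsimp only
  have hs : (PySem.List.sorted skills (fun x => x) false).Pairwise (· ≤ ·) := by
    have := PySem.List.sorted_pairwise skills (fun x => x)
    simpa using this
  rw [PySem.List.len_eq, PySem.List.pyRange_one]
  have e1 : ((((PySem.List.sorted skills (fun x => x) false).length : Int)) - 0).toNat
      = (PySem.List.sorted skills (fun x => x) false).length := by omega
  rw [e1]
  have e2 : (List.range (PySem.List.sorted skills (fun x => x) false).length).map
        (fun k : Nat => (0 : Int) + (k : Int))
      = (List.range (PySem.List.sorted skills (fun x => x) false).length).map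
        (fun k : Nat => (k : Int)) := by
    apply List.map_congr_left; intro k _; ring
  rw [e2, pv_fold_inv _ hs _ le_rfl]

-- A computes the running max, over the distinct values, of count k + count (k+1)
theorem pv_A_eq (skills : List Int) :
    findMaxTeamSize skills =
      (PySem.List.dedup (PySem.List.sorted skills (fun x => x) false)).foldl
        (fun m k => max m ((List.count k (PySem.List.sorted skills (fun x => x) false) : Int)
          + (List.count (k + 1) (PySem.List.sorted skills (fun x => x) false) : Int))) 0 := by
  unfold findMaxTeamSize
  dsimp only
  have hpA := pv_sortA_perm skills
  have hpL := PySem.List.sorted_perm skills (fun x => x) false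
  rw [pv_freqStep_eq, PySem.Dict.foldl_insert_getD_add_one_eq_counter, PySem.Dict.keys_counter]
  rw [PySem.List.foldl_congr_mem _ _
      (fun m k => max m ((List.count k skills : Int) + (List.count (k + 1) skills : Int))) 0 ?hA]
  case hA =>
    intro m k hk
    show (let c := (PySem.Dict.counter (pvSortA skills)).getD k 0
          let c := if (PySem.Dict.counter (pvSortA skills)).contains (k + 1) then
                     c + (PySem.Dict.counter (pvSortA skills)).getD (k + 1) 0 else c
          max m c) = _
    simp only [PySem.Dict.getD_counter, PySem.Dict.contains_counter]
    have h1 : List.count k (pvSortA skills) = List.count k skills := hpA.count_eq k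
    have h2 : List.count (k + 1) (pvSortA skills) = List.count (k + 1) skills := hpA.count_eq (k + 1)
    have h3 : (pvSortA skills).contains (k + 1) = decide ((k + 1) ∈ skills) := by
      simp [hpA.mem_iff]
    rw [h1, h2, h3]
    by_cases hmem : (k + 1) ∈ skills
    · simp [hmem]
    · simp [hmem, List.count_eq_zero.mpr hmem]
  have hfun : (fun (m k : Int) => max m ((List.count k skills : Int) + (List.count (k + 1) skills : Int)))
      = (fun (m k : Int) => max m ((List.count k (PySem.List.sorted skills (fun x => x) false) : Int)
          + (List.count (k + 1) (PySem.List.sorted skills (fun x => x) false) : Int))) := by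
    funext m k
    rw [hpL.count_eq, hpL.count_eq]
  rw [hfun]
  have hperm : (PySem.Set.ofList (pvSortA skills)).Perm
      (PySem.List.dedup (PySem.List.sorted skills (fun x => x) false)) := by
    rw [List.perm_ext_iff_of_nodup (PySem.Set.nodup_ofList _) (PySem.List.nodup_dedup _)]
    intro a
    rw [PySem.Set.mem_ofList, PySem.List.mem_dedup, hpA.mem_iff, hpL.mem_iff]
  exact hperm.foldl_eq'
    (f := fun m k => max m ((List.count k (PySem.List.sorted skills (fun x => x) false) : Int)
      + (List.count (k + 1) (PySem.List.sorted skills (fun x => x) false) : Int)))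
    (fun x _ y _ z => max_right_comm z _ _) 0

-- last index (+1) of value u in a sorted list, via takeWhile (· ≤ u)
theorem pv_last_idx (t : List Int) (hs : t.Pairwise (· ≤ ·)) (u : Int) (hu : u ∈ t) :
    ∃ m : Nat, 1 ≤ m ∧ m ≤ t.length ∧
      (∀ hm : m - 1 < t.length, t[m - 1] = u) ∧
      (∀ i : Nat, ∀ hi : i < t.length, m ≤ i → u < t[i]) := by
  refine ⟨(t.takeWhile (fun x => decide (x ≤ u))).length, ?_, pv_tw_le_len _ t, ?_, ?_⟩
  case refine_3 =>
    intro i hi hmi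
    have hfail := pv_tw_fail (fun x => decide (x ≤ u)) t _ rfl (lt_of_le_of_lt hmi hi)
    rw [decide_eq_false_iff_not, not_le] at hfail
    exact lt_of_lt_of_le hfail (pv_sorted_le t hs _ i hi hmi)
  case refine_1 =>
    obtain ⟨i0, hi0, he0⟩ := List.mem_iff_getElem.mp hu
    by_contra hc
    have h0 : (t.takeWhile (fun x => decide (x ≤ u))).length = 0 := by omega
    have hfail := pv_tw_fail (fun x => decide (x ≤ u)) t _ rfl (by omega)
    rw [decide_eq_false_iff_not, not_le] at hfail
    have := pv_sorted_le t hs (t.takeWhile (fun x => decide (x ≤ u))).length i0 hi0 (by omega)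
    rw [he0] at this
    omega
  case refine_2 =>
    intro hm
    obtain ⟨i0, hi0, he0⟩ := List.mem_iff_getElem.mp hu
    have hi0m : i0 < (t.takeWhile (fun x => decide (x ≤ u))).length := by
      by_contra hc
      have hfail := pv_tw_fail (fun x => decide (x ≤ u)) t _ rfl (by omega)
      rw [decide_eq_false_iff_not, not_le] at hfail
      have := pv_sorted_le t hs (t.takeWhile (fun x => decide (x ≤ u))).length i0 hi0 (by omega)
      rw [he0] at this
      omega
    have hle : t[(t.takeWhile (fun x => decide (x ≤ u))).length - 1] ≤ u := by
      have := pv_tw_get (fun x => decide (x ≤ u)) t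
        ((t.takeWhile (fun x => decide (x ≤ u))).length - 1) (by omega)
      rw [decide_eq_true_iff] at this
      exact this
    have hge : u ≤ t[(t.takeWhile (fun x => decide (x ≤ u))).length - 1] := by
      have := pv_sorted_le t hs i0 ((t.takeWhile (fun x => decide (x ≤ u))).length - 1) hm
        (by omega)
      rw [he0] at this
      exact this
    omega

-- counting through the window [p, m): values outside it never equal k or k+1
theorem pv_count_window (t : List Int) (p m : Nat) (hpm : p ≤ m) (hm : m ≤ t.length) (k : Int)
    (h1 : ∀ x ∈ t.take p, x ≠ k ∧ x ≠ k + 1) (h2 : ∀ x ∈ t.drop m, x ≠ k ∧ x ≠ k + 1) :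
    t.count k + t.count (k + 1) ≤ m - p := by
  have hsplit : t = t.take p ++ ((t.drop p).take (m - p) ++ t.drop m) := by
    have hdm : t.drop m = (t.drop p).drop (m - p) := by
      rw [List.drop_drop]
      congr 1
      omega
    rw [hdm, List.take_append_drop, List.take_append_drop]
  have hz1k : (t.take p).count k = 0 := List.count_eq_zero.mpr (fun hx => (h1 _ hx).1 rfl)
  have hz1k1 : (t.take p).count (k + 1) = 0 := List.count_eq_zero.mpr (fun hx => (h1 _ hx).2 rfl)
  have hz2k : (t.drop m).count k = 0 := List.count_eq_zero.mpr (fun hx => (h2 _ hx).1 rfl)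
  have hz2k1 : (t.drop m).count (k + 1) = 0 := List.count_eq_zero.mpr (fun hx => (h2 _ hx).2 rfl)
  have hmidlen : ((t.drop p).take (m - p)).length = m - p := by
    simp [List.length_take, List.length_drop]
    omega
  have hmid := pv_count2_le_len k (k + 1) (by omega) ((t.drop p).take (m - p))
  rw [hmidlen] at hmid
  calc t.count k + t.count (k + 1)
      = ((t.drop p).take (m - p)).count k + ((t.drop p).take (m - p)).count (k + 1) := by
        conv_lhs => rw [hsplit]
        simp [List.count_append, hz1k, hz1k1, hz2k, hz2k1]
    _ ≤ m - p := hmid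

-- the two running maxima agree on any sorted list
theorem pv_main (t : List Int) (hs : t.Pairwise (· ≤ ·)) :
    (List.range t.length).foldl (fun b (h : Nat) => max b ((h : Int) - (pvF t h : Int) + 1)) 0
    = (PySem.List.dedup t).foldl
        (fun m k => max m ((List.count k t : Int) + (List.count (k + 1) t : Int))) 0 := by
  have hR := PySem.List.le_foldl_max_int (PySem.List.dedup t)
    (fun k => (List.count k t : Int) + (List.count (k + 1) t : Int)) 0
  have hL := PySem.List.le_foldl_max_int (List.range t.length)
    (fun h : Nat => (h : Int) - (pvF t h : Int) + 1) 0
  apply le_antisymm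
  · -- every window size is at most some count k + count (k+1)
    apply pv_foldl_max_le _ _ _ _ hR.1
    intro h hh
    rw [List.mem_range] at hh
    have hple : pvF t h ≤ h := pvF_le t hs h hh
    -- the window elements all equal t[h]-1 or t[h]
    have hseg : ∀ x ∈ (t.drop (pvF t h)).take (h + 1 - pvF t h), x = t[h] - 1 ∨ x = t[h] := by
      intro x hx
      obtain ⟨i, hi, he⟩ := List.mem_iff_getElem.mp hx
      rw [List.getElem_take, List.getElem_drop] at he
      have hilen : (((t.drop (pvF t h)).take (h + 1 - pvF t h)).length) ≤ h + 1 - pvF t h := by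
        simp [List.length_take]
      have hih : pvF t h + i ≤ h := by omega
      have hub : t[pvF t h + i]'(by omega) ≤ t[h] := pv_sorted_le t hs _ h hh hih
      have hlb1 : t[pvF t h]'(by omega) ≤ t[pvF t h + i]'(by omega) :=
        pv_sorted_le t hs _ _ (by omega) (by omega)
      have hlb2 : t[h] - 1 ≤ t[pvF t h]'(by omega) := pvF_ge_val t h hh (by omega)
      rw [← he]
      omega
    have hlenseg : (((t.drop (pvF t h)).take (h + 1 - pvF t h)).length) = h + 1 - pvF t h := by
      simp [List.length_take, List.length_drop]
      omega
    have hcnt := pv_len_le_count2 (t[h] - 1) ((t.drop (pvF t h)).take (h + 1 - pvF t h))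
      (by intro x hx; have := hseg x hx; omega)
    rw [hlenseg] at hcnt
    have hsub : ((t.drop (pvF t h)).take (h + 1 - pvF t h)).Sublist t :=
      (List.take_prefix _ _).sublist.trans (List.drop_suffix _ _).sublist
    have hc1 := hsub.count_le (t[h] - 1)
    have hc2 := hsub.count_le (t[h] - 1 + 1)
    have he1 : t[h] - 1 + 1 = t[h] := by ring
    rw [he1] at hc2 hcnt
    by_cases hv : t[h] - 1 ∈ t
    · have hmem : t[h] - 1 ∈ PySem.List.dedup t := (PySem.List.mem_dedup _ _).mpr hv
      have := hR.2 _ hmem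
      simp only at this
      rw [he1] at this
      omega
    · have hz : List.count (t[h] - 1) t = 0 := List.count_eq_zero.mpr hv
      have hmem : t[h] ∈ PySem.List.dedup t := (PySem.List.mem_dedup _ _).mpr (List.getElem_mem hh)
      have := hR.2 _ hmem
      simp only at this
      have hpos : (0 : Int) ≤ List.count (t[h] + 1) t := by positivity
      omega
  · -- every count k + count (k+1) is at most some window size
    apply pv_foldl_max_le _ _ _ _ hL.1
    intro k hk
    have hkt : k ∈ t := (PySem.List.mem_dedup _ _).mp hk
    by_cases hk1 : (k + 1) ∈ t
    · obtain ⟨m, hm1, hmn, hval, hgt⟩ := pv_last_idx t hs (k + 1) hk1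
      have hmlt : m - 1 < t.length := by omega
      have hval' := hval hmlt
      have hple : pvF t (m - 1) ≤ m - 1 := pvF_le t hs (m - 1) hmlt
      have hcw := pv_count_window t (pvF t (m - 1)) m (by omega) hmn k ?h1 ?h2
      case h1 =>
        intro x hx
        obtain ⟨i, hi, he⟩ := List.mem_iff_getElem.mp hx
        rw [List.getElem_take] at he
        have hilt : i < pvF t (m - 1) := by
          have := List.length_take_le (pvF t (m - 1)) t
          omega
        have := pvF_lt_val t (m - 1) hmlt i hilt
        rw [hval'] at this
        rw [← he]
        constructor <;> omega
      case h2 =>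
        intro x hx
        obtain ⟨i, hi, he⟩ := List.mem_iff_getElem.mp hx
        rw [List.getElem_drop] at he
        have := hgt (m + i) (by simp at hi; omega) (by omega)
        rw [← he]
        constructor <;> omega
      have hLh := hL.2 (m - 1) (List.mem_range.mpr hmlt)
      simp only at hLh
      omega
    · obtain ⟨m, hm1, hmn, hval, hgt⟩ := pv_last_idx t hs k hkt
      have hmlt : m - 1 < t.length := by omega
      have hval' := hval hmlt
      have hple : pvF t (m - 1) ≤ m - 1 := pvF_le t hs (m - 1) hmlt
      have hcw := pv_count_window t (pvF t (m - 1)) m (by omega) hmn k ?h1 ?h2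
      case h1 =>
        intro x hx
        have hxt : x ∈ t := ((List.take_prefix _ _).sublist).mem hx
        obtain ⟨i, hi, he⟩ := List.mem_iff_getElem.mp hx
        rw [List.getElem_take] at he
        have hilt : i < pvF t (m - 1) := by
          have := List.length_take_le (pvF t (m - 1)) t
          omega
        have := pvF_lt_val t (m - 1) hmlt i hilt
        rw [hval'] at this
        refine ⟨by omega, fun hc => hk1 (hc ▸ hxt)⟩
      case h2 =>
        intro x hx
        have hxt : x ∈ t := ((List.drop_suffix _ _).sublist).mem hx
        obtain ⟨i, hi, he⟩ := List.mem_iff_getElem.mp hx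
        rw [List.getElem_drop] at he
        have := hgt (m + i) (by simp at hi; omega) (by omega)
        refine ⟨by omega, fun hc => hk1 (hc ▸ hxt)⟩
      have hLh := hL.2 (m - 1) (List.mem_range.mpr hmlt)
      simp only at hLh
      have hz : List.count (k + 1) t = 0 := List.count_eq_zero.mpr hk1
      omega

-- ===== VERDICT (by name: the statement is the Claim_ definition above) =====
theorem findMaxTeamSize_spec : Claim_equal_findMaxTeamSize := by
  intro skills _
  unfold Spec_findMaxTeamSize
  rw [pv_A_eq, pv_alt_eq]
  exact (pv_main _ (by simpa using PySem.List.sorted_pairwise skills (fun x => x))).symm
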